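-- pv_equiv track=rewrite | github.com/shanemarvinmay/interview-prep | questions/coding/leetcode_1351/count_negative_numbers_in_a_sorted_matrix_solution.py | binary_search_for_first_neg
-- ===== SOURCE A (Python) =====
-- def binary_search_for_first_neg(row):
--     l = 0
--     r = len(row) - 1
--
--     while l <= r:
--         m = (l + r) // 2
--         # If positive, go right
--         if row[m] >= 0:
--             l = m + 1
--         # If negative
--         else:
--             # Check if first neg and return idx.
--             if m == 0 or row[m-1] >= 0:
--                 return m
--             # Need to go left.
--             else:
--                 r = m - 1
--     # No negative was found.
--     return -1
-- ===== SOURCE B (Python) =====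
-- def binary_search_for_first_neg(row):
--     # Single left-to-right scan: on a non-increasing row the first negative
--     # encountered is exactly the boundary the binary search finds.
--     for i, v in enumerate(row):
--         if v < 0:
--             return i
--     return -1
-- ===== Notes on version B (the rewrite author's own statement) =====
-- stated objective: simpler
-- what changed: Replaces the hand-written binary search over an (l,r) interval with a single left-to-right linear scan returning the index of the first negative element; on the non-increasing rows this LeetCode-1351 helper is specified for, the two coincide.
-- outside the precondition, e.g. on binary_search_for_first_neg([-1, 1, -1]): A returns 2, B returns 0
import Mathlib
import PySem

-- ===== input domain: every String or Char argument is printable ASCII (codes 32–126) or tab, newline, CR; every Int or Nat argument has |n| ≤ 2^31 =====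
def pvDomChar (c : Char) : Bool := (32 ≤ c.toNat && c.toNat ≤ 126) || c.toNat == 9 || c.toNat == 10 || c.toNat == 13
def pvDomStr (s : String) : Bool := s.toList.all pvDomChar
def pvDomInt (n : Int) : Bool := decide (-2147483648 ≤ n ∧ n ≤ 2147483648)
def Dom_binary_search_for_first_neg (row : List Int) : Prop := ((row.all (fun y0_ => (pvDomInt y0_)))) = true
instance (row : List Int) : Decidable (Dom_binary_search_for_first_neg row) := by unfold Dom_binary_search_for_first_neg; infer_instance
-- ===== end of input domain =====

-- B replaces the hand-written binary search by a single linear scan for the first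
-- negative element; on non-increasing rows (the helper's natural domain) they agree.

-- ===== PORT A =====
-- the while loop of A, recursion on the shrinking interval [l, r];
-- pyGetD is used because inside the loop 0 ≤ l ≤ m ≤ r < len always holds, so
-- Python's row[m] / row[m-1] never raises (the default 0 is unreachable)
def pvALoop (row : List Int) (l r : Int) : Int :=
  if h : l ≤ r then
    let m := PySem.Int.floordiv (l + r) 2
    if PySem.List.pyGetD row m 0 ≥ 0 then
      pvALoop row (m + 1) r
    else
      if m = 0 ∨ PySem.List.pyGetD row (m - 1) 0 ≥ 0 then m
      else pvALoop row l (m - 1)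
  else -1
termination_by (r + 1 - l).toNat
decreasing_by
  · have := PySem.Int.floordiv_two_mid_bounds h; omega
  · have := PySem.Int.floordiv_two_mid_bounds h; omega

def binary_search_for_first_neg (row : List Int) : Int :=
  pvALoop row 0 ((row.length : Int) - 1)

-- ===== PORT B =====
-- linear scan: 'for i, v in enumerate(row): if v < 0: return i' / 'return -1'
def pvScan (row : List Int) (i : Int) : Int :=
  match row with
  | [] => -1
  | v :: rest => if v < 0 then i else pvScan rest (i + 1)

def binary_search_for_first_neg_alt (row : List Int) : Int :=
  pvScan row 0

-- ===== PRECONDITION & SPEC =====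
-- Pre_ restricts to the function's natural domain (LeetCode 1351: rows sorted in
-- non-increasing order, so the negatives form a suffix); Pre_ demands only that
-- sign pattern, the exact property the search relies on; on rows whose negatives
-- are not a suffix A's binary search returns an accidental local boundary rather
-- than the first negative (see cites).
def Pre_binary_search_for_first_neg (row : List Int) : Prop :=
  List.Pairwise (fun a b => b < 0 ∨ 0 ≤ a) row
instance (row : List Int) : Decidable (Pre_binary_search_for_first_neg row) := by
  unfold Pre_binary_search_for_first_neg; infer_instance

def pvWitness_binary_search_for_first_neg : List Int := [3, 1, -2, -5]

def Spec_binary_search_for_first_neg (row : List Int) (out : Int) : Prop :=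
  out = binary_search_for_first_neg_alt row
instance (row : List Int) (out : Int) : Decidable (Spec_binary_search_for_first_neg row out) := by
  unfold Spec_binary_search_for_first_neg; infer_instance

-- ===== CLAIM (what is proved, stated in full; the proofs are below) =====
def Claim_equal_binary_search_for_first_neg : Prop :=
  ∀ (row : List Int), Dom_binary_search_for_first_neg row →
    Pre_binary_search_for_first_neg row →
    Spec_binary_search_for_first_neg row (binary_search_for_first_neg row)

-- ===== LEMMAS AND PROOFS =====

-- findIdx is minimal: a hit at k bounds it
theorem pvFindIdx_le (p : Int → Bool) (xs : List Int) (k : Nat)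
    (h : k < xs.length) (hp : p (xs[k]) = true) : List.findIdx p xs ≤ k := by
  by_contra hc
  push_neg at hc
  have := List.not_of_lt_findIdx hc
  exact Bool.noConfusion (hp.symm.trans this)

-- B's scan returns i + findIdx if a negative exists, else -1
theorem pvScan_eq_findIdx (row : List Int) (i : Int) :
    pvScan row i =
      if row.findIdx (fun v => v < 0) < row.length
      then i + (row.findIdx (fun v => v < 0) : Int) else -1 := by
  induction row generalizing i with
  | nil => simp [pvScan]
  | cons v rest ih =>
    by_cases hv : v < 0
    · simp [pvScan, hv, List.findIdx_cons]
    · rw [pvScan, if_neg hv, ih (i + 1), List.findIdx_cons]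
      have hd : (decide (v < 0)) = false := by simp [hv]
      rw [hd]
      simp only [cond_false, List.length_cons]
      by_cases h : rest.findIdx (fun v => v < 0) < rest.length
      · rw [if_pos h, if_pos (by omega)]
        push_cast
        ring
      · rw [if_neg h, if_neg (by omega)]

-- sign monotonicity: a nonnegative entry forces all earlier entries nonnegative
theorem pvSignMono (row : List Int)
    (hs : List.Pairwise (fun a b => b < 0 ∨ 0 ≤ a) row) {a b : Nat} (hab : a ≤ b)
    (hb : b < row.length) (h : 0 ≤ row[b]) : 0 ≤ row[a]'(by omega) := by
  rcases Nat.eq_or_lt_of_le hab with rfl | hlt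
  · exact h
  · rcases List.pairwise_iff_getElem.mp hs a b (by omega) hb hlt with hneg | hok
    · omega
    · exact hok

-- A's loop equals B's answer, given the window invariant on the first-negative index
theorem pvALoop_eq (row : List Int) (hs : List.Pairwise (fun a b => b < 0 ∨ 0 ≤ a) row) (l r : Int)
    (hl : 0 ≤ l) (hr : r < (row.length : Int))
    (hwin : row.findIdx (fun v => v < 0) < row.length →
      l ≤ (row.findIdx (fun v => v < 0) : Int) ∧ (row.findIdx (fun v => v < 0) : Int) ≤ r) :
    pvALoop row l r = binary_search_for_first_neg_alt row := by
  rw [binary_search_for_first_neg_alt, pvScan_eq_findIdx]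
  set fi := row.findIdx (fun v => v < 0) with hfi
  generalize hn : (r + 1 - l).toNat = n
  induction n using Nat.strong_induction_on generalizing l r with
  | h n ih =>
  by_cases hlr : l ≤ r
  all_goals rw [pvALoop]
  · rw [dif_pos hlr]
    have hml := PySem.Int.floordiv_two_mid_bounds hlr
    set m := PySem.Int.floordiv (l + r) 2 with hm
    have hm0 : 0 ≤ m := by omega
    have hmlen : m < (row.length : Int) := by omega
    have hgm : PySem.List.pyGetD row m 0 = row[m.toNat]'(by omega) :=
      PySem.List.pyGetD_eq_getElem row 0 hm0 hmlen
    by_cases hpos : PySem.List.pyGetD row m 0 ≥ 0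
    · -- row[m] ≥ 0 : go right; fi must lie past m
      rw [if_pos hpos]
      refine ih (r + 1 - (m + 1)).toNat (by omega) (m + 1) r (by omega) hr ?_ rfl
      intro hfl
      refine ⟨?_, (hwin hfl).2⟩
      by_contra hc
      push_neg at hc
      have hneg : row[fi]'(by omega) < 0 := by
        have := @List.findIdx_getElem _ (fun v => v < 0) row (by rw [← hfi]; omega)
        simp only [decide_eq_true_eq] at this
        simpa [← hfi] using this
      have hge : 0 ≤ row[fi]'(by omega) :=
        pvSignMono row hs (a := fi) (b := m.toNat) (by omega) (by omega) (by omega)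
      omega
    · rw [if_neg hpos]
      push_neg at hpos
      by_cases hfirst : m = 0 ∨ PySem.List.pyGetD row (m - 1) 0 ≥ 0
      · -- return m; m is exactly the first-negative index
        rw [if_pos hfirst]
        have hbefore : ∀ k : Nat, (_ : k < m.toNat) → 0 ≤ row[k]'(by omega) := by
          intro k hk
          rcases hfirst with h0 | hge
          · omega
          · have hm1 : PySem.List.pyGetD row (m - 1) 0 = row[(m - 1).toNat]'(by omega) :=
              PySem.List.pyGetD_eq_getElem row 0 (by omega) (by omega)
            exact pvSignMono row hs (a := k) (b := (m - 1).toNat) (by omega) (by omega) (by omega)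
        have hfim : fi = m.toNat := by
          have hle : fi ≤ m.toNat := by
            rw [hfi]
            exact pvFindIdx_le _ row m.toNat (by omega) (by simp only [decide_eq_true_eq]; omega)
          rcases Nat.lt_or_ge fi m.toNat with hlt | hge2
          · exfalso
            have hneg : row[fi]'(by omega) < 0 := by
              have := @List.findIdx_getElem _ (fun v => v < 0) row (by rw [← hfi]; omega)
              simp only [decide_eq_true_eq] at this
              simpa [← hfi] using this
            have := hbefore fi hlt
            omega
          · omega
        rw [if_pos (by omega)]
        omega
      · -- row[m-1] < 0 too : go left; fi ≤ m - 1
        rw [if_neg hfirst]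
        push_neg at hfirst
        refine ih (m - 1 + 1 - l).toNat (by omega) l (m - 1) hl (by omega) ?_ rfl
        intro hfl
        refine ⟨(hwin hfl).1, ?_⟩
        have hm1 : PySem.List.pyGetD row (m - 1) 0 = row[(m - 1).toNat]'(by omega) :=
          PySem.List.pyGetD_eq_getElem row 0 (by omega) (by omega)
        have hle : fi ≤ (m - 1).toNat := by
          rw [hfi]
          exact pvFindIdx_le _ row (m - 1).toNat (by omega)
            (by simp only [decide_eq_true_eq]; omega)
        omega
  · -- l > r : no negative remains, return -1
    rw [dif_neg hlr, if_neg]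
    intro hc
    have := hwin hc
    omega

-- ===== VERDICT (by name: the statement is the Claim_ definition above) =====
theorem binary_search_for_first_neg_spec : Claim_equal_binary_search_for_first_neg := by
  intro row _ hpre
  unfold Spec_binary_search_for_first_neg binary_search_for_first_neg
  exact pvALoop_eq row hpre 0 ((row.length : Int) - 1) (by omega) (by omega)
    (fun h => ⟨by omega, by omega⟩)
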